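-- pv_equiv track=rewrite | github.com/jaromirsalamon/NPFL067-2-Words-and-The-Company-They-Keep | bf.py | generateBigrams
-- ===== SOURCE A (Python) =====
-- def generateBigrams(tokens, distance):
--     grams = []
--     for i, item in enumerate(tokens[:]):
--         for j in range(1, distance+1):
--             if i+j < len(tokens):
--                 grams.append((tokens[i+j-1], tokens[i+j]))
--             else:
--                 break
--     return grams
-- ===== SOURCE B (Python) =====
-- def generateBigrams(tokens, distance):
--     # Sliding-window queue: maintain the current run of adjacent bigrams
--     # incrementally (pop one from the front, push one at the back per step)
--     # instead of rebuilding/rescanning it for every start index.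
--     n = len(tokens)
--     out = []
--     window = []
--     j = 0
--     while len(window) < distance and j + 1 < n:
--         window.append((tokens[j], tokens[j + 1]))
--         j += 1
--     for _ in range(n):
--         out += window
--         if window:
--             window.pop(0)
--         if len(window) < distance and j + 1 < n:
--             window.append((tokens[j], tokens[j + 1]))
--             j += 1
--     return out
-- ===== Notes on version B (the rewrite author's own statement) =====
-- stated objective: alternative
-- what changed: B replaces A's per-start inner scan (re-reading up to `distance` token pairs and re-doing the bounds check for every start index) with a sliding-window queue of bigrams updated incrementally -- one pop from the front and at most one push at the back per step -- and emitted whole via a bulk list extend at each position.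
import Mathlib
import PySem

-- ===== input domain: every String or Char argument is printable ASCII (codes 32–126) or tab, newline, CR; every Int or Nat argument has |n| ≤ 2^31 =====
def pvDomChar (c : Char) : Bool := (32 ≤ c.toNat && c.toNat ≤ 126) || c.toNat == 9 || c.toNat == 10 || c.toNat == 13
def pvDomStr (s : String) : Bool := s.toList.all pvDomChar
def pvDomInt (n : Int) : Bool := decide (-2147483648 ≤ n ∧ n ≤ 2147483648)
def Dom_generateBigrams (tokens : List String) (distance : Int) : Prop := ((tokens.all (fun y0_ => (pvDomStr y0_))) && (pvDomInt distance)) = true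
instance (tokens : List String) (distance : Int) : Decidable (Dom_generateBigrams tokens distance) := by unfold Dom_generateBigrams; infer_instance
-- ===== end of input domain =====

-- B maintains the run of adjacent bigrams as an incrementally updated sliding-window queue
-- (one pop from the front, at most one push at the back per step, emitted whole via a bulk extend)
-- instead of A's per-start inner scan; objective: alternative (same asymptotic cost).


-- ===== PORT A =====
-- inner 'for j in range(1, distance+1): if i+j < len(tokens): grams.append(...) else: break'
-- (the indices i+j-1 and i+j are in range whenever the branch is taken, so pyGetD's default is never used)
def pvInnerA (tokens : List String) (i : Int) (j stop : Int)
    (acc : List (String × String)) : List (String × String) :=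
  if _h : j < stop then
    if i + j < (tokens.length : Int) then
      pvInnerA tokens i (j + 1) stop
        (acc ++ [(PySem.List.pyGetD tokens (i + j - 1) "", PySem.List.pyGetD tokens (i + j) "")])
    else acc
  else acc
termination_by (stop - j).toNat
decreasing_by omega

def generateBigrams (tokens : List String) (distance : Int) : List (String × String) :=
  (PySem.List.enumerate tokens 0).foldl
    (fun acc p => pvInnerA tokens p.1 1 (distance + 1) acc) []

-- ===== PORT B =====
-- 'while len(window) < distance and j + 1 < n: window.append((tokens[j], tokens[j+1])); j += 1'
-- (j is in range whenever an element is appended, so pyGetD's default is never used)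
def pvFillB (tokens : List String) (distance : Int)
    (window : List (String × String)) (j : Int) :
    List (String × String) × Int :=
  if _h : (window.length : Int) < distance ∧ j + 1 < (tokens.length : Int) then
    pvFillB tokens distance
      (window ++ [(PySem.List.pyGetD tokens j "", PySem.List.pyGetD tokens (j + 1) "")]) (j + 1)
  else (window, j)
termination_by ((tokens.length : Int) - 1 - j).toNat
decreasing_by omega

-- one iteration of 'for _ in range(n)': emit the window, pop its front, refill its back
def pvStepB (tokens : List String) (distance : Int)
    (st : List (String × String) × List (String × String) × Int) (_i : Nat) :
    List (String × String) × List (String × String) × Int :=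
  let out := st.1 ++ st.2.1
  let window := if st.2.1 = [] then st.2.1 else st.2.1.tail
  if (window.length : Int) < distance ∧ st.2.2 + 1 < (tokens.length : Int) then
    (out, window ++ [(PySem.List.pyGetD tokens st.2.2 "", PySem.List.pyGetD tokens (st.2.2 + 1) "")], st.2.2 + 1)
  else (out, window, st.2.2)

def generateBigrams_alt (tokens : List String) (distance : Int) : List (String × String) :=
  let wj := pvFillB tokens distance [] 0
  ((List.range tokens.length).foldl (pvStepB tokens distance) ([], wj.1, wj.2)).1

-- ===== PRECONDITION & SPEC =====
def Spec_generateBigrams (tokens : List String) (distance : Int) (out : List (String × String)) : Prop := out = generateBigrams_alt tokens distance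
instance (tokens : List String) (distance : Int) (out : List (String × String)) : Decidable (Spec_generateBigrams tokens distance out) := by unfold Spec_generateBigrams; infer_instance

-- ===== CLAIM (what is proved, stated in full; the proofs are below) =====
def Claim_equal_generateBigrams : Prop := ∀ (tokens : List String) (distance : Int), Dom_generateBigrams tokens distance → Spec_generateBigrams tokens distance (generateBigrams tokens distance)

-- ===== LEMMAS AND PROOFS =====

-- A's inner loop starting at j = a with c iterations left appends exactly the slice
-- (pairs.drop (i+a-1)).take c of the adjacency table.
theorem pvInnerA_eq (tokens : List String) (i : Nat) :
    ∀ (c a : Nat) (acc : List (String × String)), 1 ≤ a →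
      pvInnerA tokens (i : Int) (a : Int) ((a : Int) + (c : Int)) acc
        = acc ++ ((tokens.zip tokens.tail).drop (i + a - 1)).take c := by
  intro c
  induction c with
  | zero =>
    intro a acc ha
    rw [pvInnerA]
    simp
  | succ c ih =>
    intro a acc ha
    rw [pvInnerA]
    rw [dif_pos (show (a : Int) < (a : Int) + ((c.succ : Nat) : Int) by push_cast; omega)]
    have hlenpairs : (tokens.zip tokens.tail).length = tokens.length - 1 := by
      simp [List.length_zip, List.length_tail]
    by_cases h : (i : Int) + (a : Int) < (tokens.length : Int)
    · rw [if_pos h]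
      have hIa : ((i + a - 1 : Nat) : Int) = (i : Int) + (a : Int) - 1 := by omega
      have hIa' : ((i + a : Nat) : Int) = (i : Int) + (a : Int) := by omega
      have hb1 : i + a - 1 < (tokens.zip tokens.tail).length := by omega
      have hb2 : i + a - 1 < tokens.length := by omega
      have hb3 : i + a < tokens.length := by omega
      have e1 : PySem.List.pyGetD tokens ((i : Int) + (a : Int) - 1) "" = tokens[i + a - 1] := by
        rw [← hIa, PySem.List.pyGetD_natCast]
        exact List.getD_eq_getElem _ _ hb2
      have e2 : PySem.List.pyGetD tokens ((i : Int) + (a : Int)) "" = tokens[i + a] := by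
        rw [← hIa', PySem.List.pyGetD_natCast]
        exact List.getD_eq_getElem _ _ hb3
      have hcast : ((a : Int) + 1) = ((a + 1 : Nat) : Int) := by omega
      rw [e1, e2]
      rw [show ((a : Int) + ((Nat.succ c : Nat) : Int)) = ((a + 1 : Nat) : Int) + (c : Int) by push_cast; ring]
      rw [show ((a : Int) + 1) = ((a + 1 : Nat) : Int) from hcast, ih (a + 1) _ (by omega)]
      have hb4 : i + a - 1 < tokens.tail.length :=
        lt_of_lt_of_le hb1 (by rw [List.length_zip]; exact min_le_right _ _)
      have hdrop : (tokens.zip tokens.tail).drop (i + a - 1)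
          = ((tokens[i + a - 1], tokens[i + a]) : String × String) :: (tokens.zip tokens.tail).drop (i + a) := by
        rw [List.drop_eq_getElem_cons hb1, List.getElem_zip, List.getElem_tail hb4]
        simp only [show i + a - 1 + 1 = i + a from by omega]
      rw [show i + (a + 1) - 1 = i + a by omega, hdrop]
      simp [List.take_succ_cons]
    · rw [if_neg h]
      have : (tokens.zip tokens.tail).drop (i + a - 1) = [] := by
        apply List.drop_eq_nil_of_le; omega
      simp [this]

-- pointwise-equal fold functions give equal folds
theorem pvFold_ext {α β : Type} (l : List α) (f g : List β → α → List β) (init : List β)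
    (h : ∀ acc x, f acc x = g acc x) : l.foldl f init = l.foldl g init := by
  induction l generalizing init with
  | nil => rfl
  | cons x xs ih => simp only [List.foldl_cons, h]; exact ih _

theorem generateBigrams_eq_common (tokens : List String) (distance : Int) :
    generateBigrams tokens distance
      = (List.range tokens.length).foldl
          (fun acc i => acc ++ ((tokens.zip tokens.tail).drop i).take distance.toNat) [] := by
  unfold generateBigrams
  rw [PySem.List.enumerate_eq_map_pyRange tokens ""]
  rw [List.foldl_map]
  rw [show PySem.List.len tokens = ((tokens.length : Nat) : Int) from rfl]
  rw [PySem.List.pyRange_zero_nat]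
  rw [List.foldl_map]
  apply pvFold_ext
  intro acc k
  by_cases hd : 0 ≤ distance
  · have h := pvInnerA_eq tokens k distance.toNat 1 acc (le_refl 1)
    simp only [Nat.cast_one, Nat.add_sub_cancel] at h
    rw [show distance + 1 = (1 : Int) + (distance.toNat : Int) by omega]
    simpa using h
  · have ht : distance.toNat = 0 := by omega
    rw [pvInnerA]
    simp [ht]
    omega

-- the prefill loop turns pairs.take k into pairs.take (min d m)
theorem pvFillB_eq (tokens : List String) (distance : Int) :
    ∀ (fuel k : Nat),
      min distance.toNat (tokens.zip tokens.tail).length - k ≤ fuel →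
      k ≤ min distance.toNat (tokens.zip tokens.tail).length →
      pvFillB tokens distance ((tokens.zip tokens.tail).take k) (k : Int)
        = ((tokens.zip tokens.tail).take (min distance.toNat (tokens.zip tokens.tail).length),
           ((min distance.toNat (tokens.zip tokens.tail).length : Nat) : Int)) := by
  intro fuel
  induction fuel with
  | zero =>
    intro k hf hk
    have hk' : k = min distance.toNat (tokens.zip tokens.tail).length := by omega
    rw [pvFillB]
    have hlenpairs : (tokens.zip tokens.tail).length = tokens.length - 1 := by
      simp [List.length_zip, List.length_tail]
    rw [dif_neg]
    · rw [hk']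
    · rw [List.length_take]
      omega
  | succ fuel ih =>
    intro k hf hk
    have hlenpairs : (tokens.zip tokens.tail).length = tokens.length - 1 := by
      simp [List.length_zip, List.length_tail]
    by_cases h : k < min distance.toNat (tokens.zip tokens.tail).length
    · rw [pvFillB]
      rw [dif_pos]
      · have hkm : k < (tokens.zip tokens.tail).length := by omega
        have hk1 : k < tokens.length := by omega
        have hk2 : k + 1 < tokens.length := by omega
        have e1 : PySem.List.pyGetD tokens ((k : Nat) : Int) "" = tokens[k] := by
          rw [PySem.List.pyGetD_natCast]; exact List.getD_eq_getElem _ _ hk1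
        have e2' : PySem.List.pyGetD tokens (((k : Nat) : Int) + 1) "" = tokens[k + 1] := by
          rw [show (((k : Nat) : Int) + 1) = (((k + 1 : Nat)) : Int) by omega, PySem.List.pyGetD_natCast]
          exact List.getD_eq_getElem _ _ hk2
        have hkt : k < tokens.tail.length := by
          have := hkm; rw [List.length_zip] at this; omega
        have hpair : (tokens.zip tokens.tail)[k] = (tokens[k], tokens[k + 1]) := by
          rw [List.getElem_zip, List.getElem_tail hkt]
        have htake : (tokens.zip tokens.tail).take k ++ [(tokens[k], tokens[k + 1])]
            = (tokens.zip tokens.tail).take (k + 1) := by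
          rw [List.take_succ, List.getElem?_eq_getElem hkm, hpair]
          rfl
        rw [e1, e2', htake, show ((k : Nat) : Int) + 1 = (((k + 1 : Nat)) : Int) by omega]
        exact ih (k + 1) (by omega) (by omega)
      · constructor
        · rw [List.length_take]; omega
        · omega
    · have hk' : k = min distance.toNat (tokens.zip tokens.tail).length := by omega
      rw [pvFillB, dif_neg]
      · rw [hk']
      · rw [List.length_take]; omega

-- zip adjacency table lookup: pairs[k]? is the k-th adjacent bigram
theorem pvPairs_getElem? (tokens : List String) (k : Nat) (h : k + 1 < tokens.length) :
    (tokens.zip tokens.tail)[k]? = some (tokens[k]'(by omega), tokens[k + 1]'h) := by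
  have hk : k < (tokens.zip tokens.tail).length := by
    rw [List.length_zip, List.length_tail]; omega
  have hkt : k < tokens.tail.length := by rw [List.length_tail]; omega
  rw [List.getElem?_eq_getElem hk, List.getElem_zip, List.getElem_tail hkt]

-- splitting off the last element of a take
theorem pvTake_split {α : Type} (l : List α) (d : Nat) (hd : 1 ≤ d) (x : α)
    (hx : l[d - 1]? = some x) : l.take d = l.take (d - 1) ++ [x] := by
  conv_lhs => rw [show d = (d - 1) + 1 by omega]
  rw [List.take_succ, hx]
  rfl

-- the main loop preserves the window invariant: at index i the window is (pairs.drop i).take d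
-- and j = min (i + d) m; each step emits exactly the slice the common form emits.
theorem pvLoopB_eq (tokens : List String) (distance : Int) (hd : 0 < distance) :
    ∀ (cnt i : Nat) (out : List (String × String)),
      i + cnt = tokens.length →
      ((List.range' i cnt).foldl (pvStepB tokens distance)
          (out, ((tokens.zip tokens.tail).drop i).take distance.toNat,
           ((min (i + distance.toNat) (tokens.zip tokens.tail).length : Nat) : Int))).1
        = (List.range' i cnt).foldl
            (fun acc k => acc ++ ((tokens.zip tokens.tail).drop k).take distance.toNat) out := by
  intro cnt
  induction cnt with
  | zero => intro i out _; rfl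
  | succ cnt ih =>
    intro i out hn
    have hm : (tokens.zip tokens.tail).length = tokens.length - 1 := by
      simp [List.length_zip, List.length_tail]
    have hd1 : 1 ≤ distance.toNat := by omega
    rw [List.range'_succ]
    simp only [List.foldl_cons]
    have hpop : (if ((tokens.zip tokens.tail).drop i).take distance.toNat = []
          then ((tokens.zip tokens.tail).drop i).take distance.toNat
          else (((tokens.zip tokens.tail).drop i).take distance.toNat).tail)
        = ((tokens.zip tokens.tail).drop (i + 1)).take (distance.toNat - 1) := by
      by_cases hw : ((tokens.zip tokens.tail).drop i).take distance.toNat = []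
      · rw [if_pos hw]
        have hlen0 : (tokens.zip tokens.tail).length ≤ i := by
          have h := congrArg List.length hw
          rw [List.length_take, List.length_drop] at h
          simp at h
          omega
        have h1 : (tokens.zip tokens.tail).drop (i + 1) = [] :=
          List.drop_eq_nil_of_le (by omega)
        rw [hw, h1]
        simp
      · rw [if_neg hw]
        conv_lhs => rw [← List.drop_one, List.drop_take]
        rw [List.drop_drop]
    have hstep : pvStepB tokens distance
        (out, ((tokens.zip tokens.tail).drop i).take distance.toNat,
         ((min (i + distance.toNat) (tokens.zip tokens.tail).length : Nat) : Int)) i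
        = (out ++ ((tokens.zip tokens.tail).drop i).take distance.toNat,
           ((tokens.zip tokens.tail).drop (i + 1)).take distance.toNat,
           ((min (i + 1 + distance.toNat) (tokens.zip tokens.tail).length : Nat) : Int)) := by
      simp only [pvStepB, hpop]
      have hlen : (((tokens.zip tokens.tail).drop (i + 1)).take (distance.toNat - 1)).length
          = min (distance.toNat - 1) ((tokens.zip tokens.tail).length - (i + 1)) := by
        rw [List.length_take, List.length_drop]
      by_cases hc : i + distance.toNat < (tokens.zip tokens.tail).length
      · rw [if_pos]
        · have hj1 : i + distance.toNat < tokens.length := by omega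
          have hj2 : i + distance.toNat + 1 < tokens.length := by omega
          have e1 : PySem.List.pyGetD tokens
                ((min (i + distance.toNat) (tokens.zip tokens.tail).length : Nat) : Int) ""
              = tokens[i + distance.toNat]'hj1 := by
            rw [show ((min (i + distance.toNat) (tokens.zip tokens.tail).length : Nat) : Int)
                = ((i + distance.toNat : Nat) : Int) by omega, PySem.List.pyGetD_natCast]
            exact List.getD_eq_getElem _ _ hj1
          have e2 : PySem.List.pyGetD tokens
                (((min (i + distance.toNat) (tokens.zip tokens.tail).length : Nat) : Int) + 1) ""
              = tokens[i + distance.toNat + 1]'hj2 := by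
            rw [show (((min (i + distance.toNat) (tokens.zip tokens.tail).length : Nat) : Int) + 1)
                = ((i + distance.toNat + 1 : Nat) : Int) by omega, PySem.List.pyGetD_natCast]
            exact List.getD_eq_getElem _ _ hj2
          have hx : ((tokens.zip tokens.tail).drop (i + 1))[distance.toNat - 1]?
              = some (PySem.List.pyGetD tokens
                        ((min (i + distance.toNat) (tokens.zip tokens.tail).length : Nat) : Int) "",
                      PySem.List.pyGetD tokens
                        (((min (i + distance.toNat) (tokens.zip tokens.tail).length : Nat) : Int) + 1) "") := by
            rw [List.getElem?_drop, show i + 1 + (distance.toNat - 1) = i + distance.toNat by omega,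
              pvPairs_getElem? tokens (i + distance.toNat) hj2, e1, e2]
          rw [pvTake_split _ distance.toNat hd1 _ hx]
          rw [show ((min (i + distance.toNat) (tokens.zip tokens.tail).length : Nat) : Int) + 1
              = ((min (i + 1 + distance.toNat) (tokens.zip tokens.tail).length : Nat) : Int) by omega]
        · constructor
          · rw [hlen]; omega
          · rw [show ((min (i + distance.toNat) (tokens.zip tokens.tail).length : Nat) : Int)
                = ((i + distance.toNat : Nat) : Int) by omega]
            omega
      · rw [if_neg]
        · have hle : ((tokens.zip tokens.tail).drop (i + 1)).length ≤ distance.toNat - 1 := by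
            rw [List.length_drop]; omega
          rw [List.take_of_length_le hle, List.take_of_length_le (le_trans hle (by omega))]
          rw [show (min (i + distance.toNat) (tokens.zip tokens.tail).length)
              = (min (i + 1 + distance.toNat) (tokens.zip tokens.tail).length) by omega]
        · intro hcon
          have h2 := hcon.2
          rw [show ((min (i + distance.toNat) (tokens.zip tokens.tail).length : Nat) : Int)
              = (((tokens.zip tokens.tail).length : Nat) : Int) by omega] at h2
          omega
    rw [hstep]
    exact ih (i + 1) (out ++ ((tokens.zip tokens.tail).drop i).take distance.toNat) (by omega)

-- distance ≤ 0: the window stays empty and nothing is ever emitted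
theorem pvLoopB_eq_nonpos (tokens : List String) (distance : Int) (hd : distance ≤ 0) :
    ∀ (l : List Nat) (out : List (String × String)),
      (l.foldl (pvStepB tokens distance) (out, [], 0)).1 = out := by
  intro l
  induction l with
  | nil => intro out; rfl
  | cons x xs ih =>
    intro out
    simp only [List.foldl_cons]
    have hstep : pvStepB tokens distance (out, ([] : List (String × String)), 0) x
        = (out, [], 0) := by
      simp only [pvStepB]
      rw [if_neg]
      · simp
      · intro hcon
        have h1 := hcon.1
        simp at h1
        omega
    rw [hstep]
    exact ih out

theorem generateBigrams_alt_eq_common (tokens : List String) (distance : Int) :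
    generateBigrams_alt tokens distance
      = (List.range tokens.length).foldl
          (fun acc i => acc ++ ((tokens.zip tokens.tail).drop i).take distance.toNat) [] := by
  unfold generateBigrams_alt
  simp only
  by_cases hd : 0 < distance
  · have hfill := pvFillB_eq tokens distance
      (min distance.toNat (tokens.zip tokens.tail).length) 0 (by omega) (by omega)
    simp only [List.take_zero, Nat.cast_zero] at hfill
    rw [hfill]
    have htake : (tokens.zip tokens.tail).take (min distance.toNat (tokens.zip tokens.tail).length)
        = ((tokens.zip tokens.tail).drop 0).take distance.toNat := by
      rw [List.drop_zero]
      by_cases h : distance.toNat ≤ (tokens.zip tokens.tail).length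
      · rw [min_eq_left h]
      · rw [min_eq_right (by omega), List.take_length,
          List.take_of_length_le (by omega)]
    rw [List.range_eq_range']
    have := pvLoopB_eq tokens distance hd tokens.length 0 [] (by omega)
    simp only [Nat.zero_add] at this
    rw [htake]
    exact this
  · push_neg at hd
    have hfill : pvFillB tokens distance [] 0 = ([], 0) := by
      rw [pvFillB, dif_neg]
      intro ⟨h1, _⟩
      simp at h1
      omega
    rw [hfill]
    rw [pvLoopB_eq_nonpos tokens distance hd]
    have ht : distance.toNat = 0 := by omega
    rw [ht]
    have hz : ∀ (l : List Nat) (acc : List (String × String)),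
        l.foldl (fun acc k => acc ++ ((tokens.zip tokens.tail).drop k).take 0) acc = acc := by
      intro l
      induction l with
      | nil => intro acc; rfl
      | cons x xs ihz =>
        intro acc
        rw [List.foldl_cons]
        have hacc : acc ++ ((tokens.zip tokens.tail).drop x).take 0 = acc := by simp
        rw [hacc]
        exact ihz acc
    exact (hz _ []).symm

-- ===== VERDICT (by name: the statement is the Claim_ definition above) =====
theorem generateBigrams_spec : Claim_equal_generateBigrams := by
  intro tokens distance _
  unfold Spec_generateBigrams
  rw [generateBigrams_eq_common, generateBigrams_alt_eq_common]
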